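-- pv_equiv track=rewrite | github.com/JSONsw/MarketBoss | ai-trading-system/src/features/validation.py | required_features_present
-- ===== SOURCE A (Python) =====
-- from typing import List, Dict, Tuple
--
-- def required_features_present(
--     features: List[Dict], required: List[str]
-- ) -> Tuple[bool, List[str]]:
--     """Return (all_ok, missing_features_list)"""
--     missing = set()
--     for f in features:
--         for r in required:
--             if r not in f:
--                 missing.add(r)
--     return (len(missing) == 0, sorted(list(missing)))
-- ===== SOURCE B (Python) =====
-- def required_features_present(features, required):
--     """Return (all_ok, missing_features_list)"""
--     if not features:
--         return (True, [])
--     common = set(features[0])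
--     for f in features[1:]:
--         common &= f.keys()
--     missing = {r for r in required if r not in common}
--     return (len(missing) == 0, sorted(missing))
-- ===== Notes on version B (the rewrite author's own statement) =====
-- stated objective: faster
-- what changed: Instead of testing every required key against every dict (collecting failures into a set), B first intersects all dicts' key sets into one common-key set and then scans required once against it.
import Mathlib
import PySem

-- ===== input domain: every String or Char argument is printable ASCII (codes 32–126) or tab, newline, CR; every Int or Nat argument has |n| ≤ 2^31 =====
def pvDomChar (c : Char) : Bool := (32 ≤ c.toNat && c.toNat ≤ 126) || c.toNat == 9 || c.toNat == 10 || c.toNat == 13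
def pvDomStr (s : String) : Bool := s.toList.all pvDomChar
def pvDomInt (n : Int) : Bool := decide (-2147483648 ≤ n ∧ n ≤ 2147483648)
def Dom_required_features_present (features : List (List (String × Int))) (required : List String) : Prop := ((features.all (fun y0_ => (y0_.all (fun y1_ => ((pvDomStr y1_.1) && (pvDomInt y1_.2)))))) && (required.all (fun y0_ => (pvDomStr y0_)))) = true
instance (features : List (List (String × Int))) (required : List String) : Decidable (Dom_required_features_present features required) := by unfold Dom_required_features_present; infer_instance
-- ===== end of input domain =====

-- B replaces A's nested scan (every required key tested against every dict) by intersecting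
-- all dicts' key sets once and scanning `required` a single time against that common-key set.


-- ===== PORT A =====
-- missing = set(); for f in features: for r in required: if r not in f: missing.add(r)
def required_features_present (features : List (List (String × Int))) (required : List String) : Bool × List String :=
  let missing : PySem.Set String :=
    features.foldl (fun m f =>
      required.foldl (fun m r =>
        if f.any (fun kv => kv.1 == r) then m else PySem.Set.add m r) m)
      PySem.Set.empty
  (decide (missing.length = 0), PySem.List.sorted missing (fun x => x) false)

-- ===== PORT B =====
-- guard empty features; intersect all key sets; one pass over required against the common set
def required_features_present_alt (features : List (List (String × Int))) (required : List String) : Bool × List String :=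
  match features with
  | [] => (true, [])
  | f0 :: rest =>
    let common : PySem.Set String :=
      rest.foldl (fun c f => PySem.Set.inter c (f.map Prod.fst))
        (PySem.Set.ofList (f0.map Prod.fst))
    let missing : PySem.Set String :=
      required.foldl (fun m r =>
        if PySem.Set.contains common r then m else PySem.Set.add m r) PySem.Set.empty
    (decide (missing.length = 0), PySem.List.sorted missing (fun x => x) false)

-- ===== PRECONDITION & SPEC =====
def Spec_required_features_present (features : List (List (String × Int))) (required : List String) (out : Bool × List String) : Prop := out = required_features_present_alt features required
instance (features : List (List (String × Int))) (required : List String) (out : Bool × List String) : Decidable (Spec_required_features_present features required out) := by unfold Spec_required_features_present; infer_instance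

-- ===== CLAIM (what is proved, stated in full; the proofs are below) =====
def Claim_equal_required_features_present : Prop := ∀ (features : List (List (String × Int))) (required : List String), Dom_required_features_present features required → Spec_required_features_present features required (required_features_present features required)

-- ===== LEMMAS AND PROOFS =====

-- membership of the "add r unless p r" fold (shared shape of A's inner loop and B's required-pass)
theorem mem_addIf (p : String → Bool) (required : List String) (m : PySem.Set String) (y : String) :
    y ∈ required.foldl (fun m r => if p r then m else PySem.Set.add m r) m
      ↔ y ∈ m ∨ (y ∈ required ∧ p y = false) := by
  induction required generalizing m with
  | nil => simp
  | cons r t ih =>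
    simp only [List.foldl_cons, ih]
    by_cases h : p r = true
    · simp [h]
      constructor
      · rintro (hm | ⟨ht, hp⟩)
        · exact Or.inl hm
        · exact Or.inr ⟨Or.inr ht, hp⟩
      · rintro (hm | ⟨hy | hy, hp⟩)
        · exact Or.inl hm
        · subst hy; simp [h] at hp
        · exact Or.inr ⟨hy, hp⟩
    · simp only [Bool.not_eq_true] at h
      simp [h, PySem.Set.mem_add]
      constructor
      · rintro ((hm | hy) | ⟨ht, hp⟩)
        · exact Or.inl hm
        · subst hy; exact Or.inr ⟨Or.inl rfl, h⟩
        · exact Or.inr ⟨Or.inr ht, hp⟩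
      · rintro (hm | ⟨hy | hy, hp⟩)
        · exact Or.inl (Or.inl hm)
        · subst hy; exact Or.inl (Or.inr rfl)
        · exact Or.inr ⟨hy, hp⟩

theorem nodup_addIf (p : String → Bool) (required : List String) (m : PySem.Set String)
    (hm : m.Nodup) :
    (required.foldl (fun m r => if p r then m else PySem.Set.add m r) m).Nodup := by
  induction required generalizing m with
  | nil => exact hm
  | cons r t ih =>
    simp only [List.foldl_cons]
    by_cases h : p r = true
    · simp only [h, if_true]; exact ih m hm
    · simp only [h]; exact ih _ (PySem.Set.nodup_add m r hm)

-- membership of A's outer fold over features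
theorem memA (features : List (List (String × Int))) (required : List String)
    (m : PySem.Set String) (y : String) :
    y ∈ features.foldl (fun m f =>
        required.foldl (fun m r =>
          if f.any (fun kv => kv.1 == r) then m else PySem.Set.add m r) m) m
      ↔ y ∈ m ∨ (y ∈ required ∧ ∃ f ∈ features, f.any (fun kv => kv.1 == y) = false) := by
  induction features generalizing m with
  | nil => simp
  | cons f t ih =>
    simp only [List.foldl_cons, ih, mem_addIf]
    constructor
    · rintro ((hm | ⟨hr, hp⟩) | ⟨hr, g, hg, hgp⟩)
      · exact Or.inl hm
      · exact Or.inr ⟨hr, f, by simp, hp⟩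
      · exact Or.inr ⟨hr, g, by simp [hg], hgp⟩
    · rintro (hm | ⟨hr, g, hg, hgp⟩)
      · exact Or.inl (Or.inl hm)
      · rcases List.mem_cons.mp hg with h | h
        · subst h; exact Or.inl (Or.inr ⟨hr, hgp⟩)
        · exact Or.inr ⟨hr, g, h, hgp⟩

theorem nodupA (features : List (List (String × Int))) (required : List String)
    (m : PySem.Set String) (hm : m.Nodup) :
    (features.foldl (fun m f =>
        required.foldl (fun m r =>
          if f.any (fun kv => kv.1 == r) then m else PySem.Set.add m r) m) m).Nodup := by
  induction features generalizing m with
  | nil => exact hm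
  | cons f t ih => exact ih _ (nodup_addIf _ required m hm)

-- membership of B's common-key intersection fold
theorem mem_common (rest : List (List (String × Int))) (c : PySem.Set String) (y : String) :
    y ∈ rest.foldl (fun c f => PySem.Set.inter c (f.map Prod.fst)) c
      ↔ y ∈ c ∧ ∀ f ∈ rest, y ∈ f.map Prod.fst := by
  induction rest generalizing c with
  | nil => simp
  | cons f t ih =>
    simp only [List.foldl_cons, ih, PySem.Set.mem_inter]
    constructor
    · rintro ⟨⟨hc, hf⟩, ht⟩
      refine ⟨hc, fun g hg => ?_⟩
      rcases List.mem_cons.mp hg with h | h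
      · subst h; exact hf
      · exact ht g h
    · rintro ⟨hc, h⟩
      exact ⟨⟨hc, h f (by simp)⟩, fun g hg => h g (by simp [hg])⟩

-- key membership: r ∈ keys(f) as A tests it vs as B tests it
theorem any_key_iff (f : List (String × Int)) (y : String) :
    f.any (fun kv => kv.1 == y) = true ↔ y ∈ f.map Prod.fst := by
  simp [List.any_eq_true, List.mem_map]

-- the two missing-sets are permutations of each other (nonempty features case)
theorem miss_perm (f0 : List (String × Int)) (rest : List (List (String × Int)))
    (required : List String) :
    (List.foldl (fun m f =>
        required.foldl (fun m r =>
          if f.any (fun kv => kv.1 == r) then m else PySem.Set.add m r) m)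
      PySem.Set.empty (f0 :: rest)).Perm
    (required.foldl (fun m r =>
        if PySem.Set.contains
            (rest.foldl (fun c f => PySem.Set.inter c (f.map Prod.fst))
              (PySem.Set.ofList (f0.map Prod.fst))) r
          then m else PySem.Set.add m r) PySem.Set.empty) := by
  rw [List.perm_ext_iff_of_nodup (nodupA _ _ _ (by simp [PySem.Set.empty]))
      (nodup_addIf _ _ _ (by simp [PySem.Set.empty]))]
  intro y
  rw [memA, mem_addIf]
  simp only [PySem.Set.empty, List.not_mem_nil, false_or]
  constructor
  · rintro ⟨hr, g, hg, hgp⟩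
    refine ⟨hr, ?_⟩
    rw [Bool.eq_false_iff]
    intro hc
    rw [PySem.Set.contains_iff, mem_common, PySem.Set.mem_ofList] at hc
    have hmem : y ∈ g.map Prod.fst := by
      rcases List.mem_cons.mp hg with h | h
      · subst h; exact hc.1
      · exact hc.2 g h
    rw [← any_key_iff] at hmem
    simp [hgp] at hmem
  · rintro ⟨hr, hc⟩
    refine ⟨hr, ?_⟩
    by_contra hall
    push Not at hall
    have : PySem.Set.contains
        (rest.foldl (fun c f => PySem.Set.inter c (f.map Prod.fst))
          (PySem.Set.ofList (f0.map Prod.fst))) y = true := by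
      rw [PySem.Set.contains_iff, mem_common, PySem.Set.mem_ofList]
      refine ⟨?_, fun g hg => ?_⟩
      · rw [← any_key_iff]
        have := hall f0 (by simp)
        simpa using this
      · rw [← any_key_iff]
        have := hall g (by simp [hg])
        simpa using this
    rw [PySem.Set.contains_iff] at this
    simp [this] at hc

-- ===== VERDICT (by name: the statement is the Claim_ definition above) =====
theorem required_features_present_spec : Claim_equal_required_features_present := by
  intro features required _
  unfold Spec_required_features_present required_features_present required_features_present_alt
  match features with
  | [] => rfl
  | f0 :: rest =>
    have hp := miss_perm f0 rest required
    simp only [Prod.mk.injEq]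
    exact ⟨by rw [hp.length_eq], (PySem.List.sorted_id_eq_sorted_id_iff_perm _ _).mpr hp⟩
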